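-- pv_equiv track=rewrite | github.com/feamando/pmos | tools/integrations/github_brain_sync.py | analyze_file_changes
-- ===== SOURCE A (Python) =====
-- from typing import Any, Dict, List, Optional
--
-- def analyze_file_changes(files: List[Dict]) -> Dict[str, int]:
--     """Categorize file changes by type."""
--     categories = {
--         "frontend": 0,
--         "backend": 0,
--         "tests": 0,
--         "config": 0,
--         "docs": 0,
--         "other": 0,
--     }
--
--     for f in files:
--         filename = f.get("filename", "").lower()
--         if any(x in filename for x in ["test", "spec", "e2e", "__test__"]):
--             categories["tests"] += 1
--         elif any(
--             x in filename
--             for x in [".tsx", ".jsx", ".css", ".scss", "component", "page"]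
--         ):
--             categories["frontend"] += 1
--         elif any(
--             x in filename for x in [".go", ".py", ".kt", ".java", "service", "handler"]
--         ):
--             categories["backend"] += 1
--         elif any(x in filename for x in [".json", ".yaml", ".yml", ".config", ".env"]):
--             categories["config"] += 1
--         elif any(x in filename for x in [".md", "readme", "doc"]):
--             categories["docs"] += 1
--         else:
--             categories["other"] += 1
--
--     return {k: v for k, v in categories.items() if v > 0}
-- ===== SOURCE B (Python) =====
-- RULES = [
--     ("tests", ["test", "spec", "e2e", "__test__"]),
--     ("frontend", [".tsx", ".jsx", ".css", ".scss", "component", "page"]),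
--     ("backend", [".go", ".py", ".kt", ".java", "service", "handler"]),
--     ("config", [".json", ".yaml", ".yml", ".config", ".env"]),
--     ("docs", [".md", "readme", "doc"]),
-- ]
-- KEYS = ["frontend", "backend", "tests", "config", "docs", "other"]
--
--
-- def analyze_file_changes(files):
--     # Cascade of partitions: each rule in priority order peels its matches off
--     # the remaining pool; counts are the lengths of the peeled-off sublists.
--     remaining = [f.get("filename", "").lower() for f in files]
--     counts = {}
--     for label, kws in RULES:
--         matched = [n for n in remaining if any(k in n for k in kws)]
--         remaining = [n for n in remaining if not any(k in n for k in kws)]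
--         counts[label] = len(matched)
--     counts["other"] = len(remaining)
--     return {k: counts[k] for k in KEYS if counts[k] > 0}
-- ===== Notes on version B (the rewrite author's own statement) =====
-- stated objective: alternative
-- what changed: Replaces the per-file if/elif classification into a mutable six-counter dict by a cascade of list partitions: each rule in priority order peels its matching filenames off the remaining pool and the counts are the lengths of the peeled-off sublists.
import Mathlib
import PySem

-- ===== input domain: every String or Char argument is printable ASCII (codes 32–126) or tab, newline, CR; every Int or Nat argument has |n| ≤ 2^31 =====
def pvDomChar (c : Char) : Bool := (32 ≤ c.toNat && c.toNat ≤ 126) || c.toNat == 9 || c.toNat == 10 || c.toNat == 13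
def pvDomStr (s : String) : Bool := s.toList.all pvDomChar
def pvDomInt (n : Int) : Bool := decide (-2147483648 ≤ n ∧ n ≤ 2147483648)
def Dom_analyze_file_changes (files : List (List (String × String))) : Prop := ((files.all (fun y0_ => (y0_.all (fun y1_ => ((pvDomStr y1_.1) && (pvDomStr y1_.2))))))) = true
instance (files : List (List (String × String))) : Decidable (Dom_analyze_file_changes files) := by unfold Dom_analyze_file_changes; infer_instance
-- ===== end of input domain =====

-- B replaces A's per-file if/elif chain updating a six-counter dict by a cascade of list
-- partitions (each rule peels its matches off the remaining pool; counts are sublist lengths).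
-- Objective: alternative (same cost, different algorithmic decomposition).

-- ===== PORT A =====
def analyze_file_changes (files : List (List (String × String))) : List (String × Int) :=
  let categories : PySem.Dict String Int :=
    PySem.Dict.ofList [("frontend", 0), ("backend", 0), ("tests", 0), ("config", 0), ("docs", 0), ("other", 0)]
  let categories := files.foldl (fun categories f =>
    let filename := PySem.Str.lower ((PySem.Dict.ofList f).getD "filename" "")
    if ["test", "spec", "e2e", "__test__"].any (fun x => PySem.Str.isIn x filename) then
      categories.modify "tests" 0 (· + 1)
    else if [".tsx", ".jsx", ".css", ".scss", "component", "page"].any (fun x => PySem.Str.isIn x filename) then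
      categories.modify "frontend" 0 (· + 1)
    else if [".go", ".py", ".kt", ".java", "service", "handler"].any (fun x => PySem.Str.isIn x filename) then
      categories.modify "backend" 0 (· + 1)
    else if [".json", ".yaml", ".yml", ".config", ".env"].any (fun x => PySem.Str.isIn x filename) then
      categories.modify "config" 0 (· + 1)
    else if [".md", "readme", "doc"].any (fun x => PySem.Str.isIn x filename) then
      categories.modify "docs" 0 (· + 1)
    else
      categories.modify "other" 0 (· + 1)) categories
  categories.items.filter (fun kv => decide (0 < kv.2))

-- ===== PORT B =====
def pvRules : List (String × List String) :=
  [("tests", ["test", "spec", "e2e", "__test__"]),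
   ("frontend", [".tsx", ".jsx", ".css", ".scss", "component", "page"]),
   ("backend", [".go", ".py", ".kt", ".java", "service", "handler"]),
   ("config", [".json", ".yaml", ".yml", ".config", ".env"]),
   ("docs", [".md", "readme", "doc"])]

def pvKeys : List String := ["frontend", "backend", "tests", "config", "docs", "other"]

def analyze_file_changes_alt (files : List (List (String × String))) : List (String × Int) :=
  let remaining := files.map (fun f => PySem.Str.lower ((PySem.Dict.ofList f).getD "filename" ""))
  let st := pvRules.foldl (fun (st : PySem.Dict String Int × List String) rule =>
      let matched := st.2.filter (fun n => rule.2.any (fun k => PySem.Str.isIn k n))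
      let remaining' := st.2.filter (fun n => ! rule.2.any (fun k => PySem.Str.isIn k n))
      (st.1.insert rule.1 (matched.length : Int), remaining')) (PySem.Dict.empty, remaining)
  let counts := st.1.insert "other" (st.2.length : Int)
  pvKeys.filterMap (fun k =>
    let c := counts.getD k 0      -- counts[k]: every key of pvKeys is present in counts
    if 0 < c then some (k, c) else none)

-- ===== PRECONDITION & SPEC =====
def Spec_analyze_file_changes (files : List (List (String × String))) (out : List (String × Int)) : Prop := out = analyze_file_changes_alt files
instance (files : List (List (String × String))) (out : List (String × Int)) : Decidable (Spec_analyze_file_changes files out) := by unfold Spec_analyze_file_changes; infer_instance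

-- ===== CLAIM (what is proved, stated in full; the proofs are below) =====
def Claim_equal_analyze_file_changes : Prop := ∀ (files : List (List (String × String))), Dom_analyze_file_changes files → Spec_analyze_file_changes files (analyze_file_changes files)

-- ===== LEMMAS AND PROOFS =====

-- proof-only helpers: the five keyword lists and the category A assigns to a lowered filename
def pvHit (kws : List String) (n : String) : Bool := kws.any (fun k => PySem.Str.isIn k n)
def pvKw1 : List String := ["test", "spec", "e2e", "__test__"]
def pvKw2 : List String := [".tsx", ".jsx", ".css", ".scss", "component", "page"]
def pvKw3 : List String := [".go", ".py", ".kt", ".java", "service", "handler"]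
def pvKw4 : List String := [".json", ".yaml", ".yml", ".config", ".env"]
def pvKw5 : List String := [".md", "readme", "doc"]

def pvLabel (n : String) : String :=
  if pvHit pvKw1 n then "tests"
  else if pvHit pvKw2 n then "frontend"
  else if pvHit pvKw3 n then "backend"
  else if pvHit pvKw4 n then "config"
  else if pvHit pvKw5 n then "docs"
  else "other"

theorem pv_step_eq (d : PySem.Dict String Int) (n : String) :
    (if ["test", "spec", "e2e", "__test__"].any (fun x => PySem.Str.isIn x n) then
       d.modify "tests" 0 (· + 1)
     else if [".tsx", ".jsx", ".css", ".scss", "component", "page"].any (fun x => PySem.Str.isIn x n) then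
       d.modify "frontend" 0 (· + 1)
     else if [".go", ".py", ".kt", ".java", "service", "handler"].any (fun x => PySem.Str.isIn x n) then
       d.modify "backend" 0 (· + 1)
     else if [".json", ".yaml", ".yml", ".config", ".env"].any (fun x => PySem.Str.isIn x n) then
       d.modify "config" 0 (· + 1)
     else if [".md", "readme", "doc"].any (fun x => PySem.Str.isIn x n) then
       d.modify "docs" 0 (· + 1)
     else
       d.modify "other" 0 (· + 1)) = d.modify (pvLabel n) 0 (· + 1) := by
  unfold pvLabel pvHit pvKw1 pvKw2 pvKw3 pvKw4 pvKw5
  cases h1 : ["test", "spec", "e2e", "__test__"].any (fun x => PySem.Str.isIn x n) <;>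
  cases h2 : [".tsx", ".jsx", ".css", ".scss", "component", "page"].any (fun x => PySem.Str.isIn x n) <;>
  cases h3 : [".go", ".py", ".kt", ".java", "service", "handler"].any (fun x => PySem.Str.isIn x n) <;>
  cases h4 : [".json", ".yaml", ".yml", ".config", ".env"].any (fun x => PySem.Str.isIn x n) <;>
  cases h5 : [".md", "readme", "doc"].any (fun x => PySem.Str.isIn x n) <;>
  simp only [Bool.false_eq_true, if_true, if_false]

theorem pv_label_mem (n : String) : pvLabel n ∈ pvKeys := by
  unfold pvLabel
  split_ifs <;> simp [pvKeys]

def pvInit : PySem.Dict String Int :=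
  PySem.Dict.ofList [("frontend", 0), ("backend", 0), ("tests", 0), ("config", 0), ("docs", 0), ("other", 0)]

theorem pv_keys_final (labels : List String) (hmem : ∀ x ∈ labels, x ∈ pvKeys) :
    (labels.foldl (fun d x => d.modify x 0 (· + 1)) pvInit).keys = pvKeys := by
  rw [PySem.Dict.keys_foldl_modify labels (0 : Int) (fun _ _ => (· + 1)) pvInit]
  have hkeys : pvInit.keys = pvKeys := by decide
  rw [hkeys, PySem.Set.update_eq_append_filter]
  have hnil : List.filter (fun y => !(PySem.Set.contains pvKeys y)) (PySem.Set.ofList labels) = [] := by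
    rw [List.filter_eq_nil_iff]
    intro a ha
    have hmem' : a ∈ pvKeys := hmem a ((PySem.Set.mem_ofList labels a).mp ha)
    simp
    exact hmem'
  rw [hnil, List.append_nil]

theorem pv_items_final (labels : List String) (hmem : ∀ x ∈ labels, x ∈ pvKeys) :
    (labels.foldl (fun d x => d.modify x 0 (· + 1)) pvInit).items
      = pvKeys.map (fun k => (k, (labels.count k : Int))) := by
  have hk := pv_keys_final labels hmem
  have hnd : (labels.foldl (fun d x => d.modify x 0 (· + 1)) pvInit).keys.Nodup := by
    rw [hk]; decide
  rw [PySem.Dict.items_eq_map_keys _ hnd 0, hk]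
  apply List.map_congr_left
  intro k hkmem
  rw [PySem.Dict.getD_foldl_modify_add_one]
  have h0 : pvInit.getD k 0 = 0 := by
    fin_cases hkmem <;> decide
  rw [h0, zero_add]

-- pointwise bridge: membership in a stage of B's partition cascade ↔ the label A assigns
theorem pv_point (n : String) :
    ((pvLabel n == "tests") = pvHit pvKw1 n)
  ∧ ((pvLabel n == "frontend") = (!pvHit pvKw1 n && pvHit pvKw2 n))
  ∧ ((pvLabel n == "backend") = (!pvHit pvKw1 n && !pvHit pvKw2 n && pvHit pvKw3 n))
  ∧ ((pvLabel n == "config") = (!pvHit pvKw1 n && !pvHit pvKw2 n && !pvHit pvKw3 n && pvHit pvKw4 n))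
  ∧ ((pvLabel n == "docs") = (!pvHit pvKw1 n && !pvHit pvKw2 n && !pvHit pvKw3 n && !pvHit pvKw4 n && pvHit pvKw5 n))
  ∧ ((pvLabel n == "other") = (!pvHit pvKw1 n && !pvHit pvKw2 n && !pvHit pvKw3 n && !pvHit pvKw4 n && !pvHit pvKw5 n)) := by
  unfold pvLabel
  cases h1 : pvHit pvKw1 n <;> cases h2 : pvHit pvKw2 n <;> cases h3 : pvHit pvKw3 n <;>
  cases h4 : pvHit pvKw4 n <;> cases h5 : pvHit pvKw5 n <;> simp

-- staged-partition lengths ↔ label counts (Nat side)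
theorem pv_count1 (names : List String) :
    (names.filter (fun n => ["test", "spec", "e2e", "__test__"].any (fun k => PySem.Str.isIn k n))).length
      = (names.map pvLabel).count "tests" := by
  rw [List.count_eq_countP, List.countP_map, ← List.countP_eq_length_filter]
  apply List.countP_congr; intro n _
  have h := (pv_point n).1
  simp only [pvHit, pvKw1] at h
  simp only [Function.comp_apply, h]

theorem pv_count2 (names : List String) :
    ((names.filter (fun n => !(["test", "spec", "e2e", "__test__"].any (fun k => PySem.Str.isIn k n)))).filter
        (fun n => [".tsx", ".jsx", ".css", ".scss", "component", "page"].any (fun k => PySem.Str.isIn k n))).length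
      = (names.map pvLabel).count "frontend" := by
  rw [List.count_eq_countP, List.countP_map, List.filter_filter, ← List.countP_eq_length_filter]
  apply List.countP_congr; intro n _
  have h := (pv_point n).2.1
  simp only [pvHit, pvKw1, pvKw2] at h
  simp only [Function.comp_apply, h, Bool.and_eq_true, Bool.not_eq_true']
  tauto

theorem pv_count3 (names : List String) :
    (((names.filter (fun n => !(["test", "spec", "e2e", "__test__"].any (fun k => PySem.Str.isIn k n)))).filter
        (fun n => !([".tsx", ".jsx", ".css", ".scss", "component", "page"].any (fun k => PySem.Str.isIn k n)))).filter
        (fun n => [".go", ".py", ".kt", ".java", "service", "handler"].any (fun k => PySem.Str.isIn k n))).length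
      = (names.map pvLabel).count "backend" := by
  rw [List.count_eq_countP, List.countP_map, List.filter_filter, List.filter_filter, ← List.countP_eq_length_filter]
  apply List.countP_congr; intro n _
  have h := (pv_point n).2.2.1
  simp only [pvHit, pvKw1, pvKw2, pvKw3] at h
  simp only [Function.comp_apply, h, Bool.and_eq_true, Bool.not_eq_true']
  tauto

theorem pv_count4 (names : List String) :
    ((((names.filter (fun n => !(["test", "spec", "e2e", "__test__"].any (fun k => PySem.Str.isIn k n)))).filter
        (fun n => !([".tsx", ".jsx", ".css", ".scss", "component", "page"].any (fun k => PySem.Str.isIn k n)))).filter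
        (fun n => !([".go", ".py", ".kt", ".java", "service", "handler"].any (fun k => PySem.Str.isIn k n)))).filter
        (fun n => [".json", ".yaml", ".yml", ".config", ".env"].any (fun k => PySem.Str.isIn k n))).length
      = (names.map pvLabel).count "config" := by
  rw [List.count_eq_countP, List.countP_map, List.filter_filter, List.filter_filter, List.filter_filter, ← List.countP_eq_length_filter]
  apply List.countP_congr; intro n _
  have h := (pv_point n).2.2.2.1
  simp only [pvHit, pvKw1, pvKw2, pvKw3, pvKw4] at h
  simp only [Function.comp_apply, h, Bool.and_eq_true, Bool.not_eq_true']
  tauto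

theorem pv_count5 (names : List String) :
    (((((names.filter (fun n => !(["test", "spec", "e2e", "__test__"].any (fun k => PySem.Str.isIn k n)))).filter
        (fun n => !([".tsx", ".jsx", ".css", ".scss", "component", "page"].any (fun k => PySem.Str.isIn k n)))).filter
        (fun n => !([".go", ".py", ".kt", ".java", "service", "handler"].any (fun k => PySem.Str.isIn k n)))).filter
        (fun n => !([".json", ".yaml", ".yml", ".config", ".env"].any (fun k => PySem.Str.isIn k n)))).filter
        (fun n => [".md", "readme", "doc"].any (fun k => PySem.Str.isIn k n))).length
      = (names.map pvLabel).count "docs" := by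
  rw [List.count_eq_countP, List.countP_map, List.filter_filter, List.filter_filter, List.filter_filter, List.filter_filter, ← List.countP_eq_length_filter]
  apply List.countP_congr; intro n _
  have h := (pv_point n).2.2.2.2.1
  simp only [pvHit, pvKw1, pvKw2, pvKw3, pvKw4, pvKw5] at h
  simp only [Function.comp_apply, h, Bool.and_eq_true, Bool.not_eq_true']
  tauto

theorem pv_count6 (names : List String) :
    (((((names.filter (fun n => !(["test", "spec", "e2e", "__test__"].any (fun k => PySem.Str.isIn k n)))).filter
        (fun n => !([".tsx", ".jsx", ".css", ".scss", "component", "page"].any (fun k => PySem.Str.isIn k n)))).filter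
        (fun n => !([".go", ".py", ".kt", ".java", "service", "handler"].any (fun k => PySem.Str.isIn k n)))).filter
        (fun n => !([".json", ".yaml", ".yml", ".config", ".env"].any (fun k => PySem.Str.isIn k n)))).filter
        (fun n => !([".md", "readme", "doc"].any (fun k => PySem.Str.isIn k n)))).length
      = (names.map pvLabel).count "other" := by
  rw [List.count_eq_countP, List.countP_map, List.filter_filter, List.filter_filter, List.filter_filter, List.filter_filter, ← List.countP_eq_length_filter]
  apply List.countP_congr; intro n _
  have h := (pv_point n).2.2.2.2.2
  simp only [pvHit, pvKw1, pvKw2, pvKw3, pvKw4, pvKw5] at h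
  simp only [Function.comp_apply, h, Bool.and_eq_true, Bool.not_eq_true']
  tauto

theorem pv_assemble (g h : String → Int) (hk : ∀ k ∈ pvKeys, g k = h k) :
    (pvKeys.map (fun k => (k, g k))).filter (fun kv => decide (0 < kv.2))
      = pvKeys.filterMap (fun k => let c := h k; if 0 < c then some (k, c) else none) := by
  have : ∀ ks : List String, (∀ k ∈ ks, g k = h k) →
      (ks.map (fun k => (k, g k))).filter (fun kv => decide (0 < kv.2))
        = ks.filterMap (fun k => let c := h k; if 0 < c then some (k, c) else none) := by
    intro ks
    induction ks with
    | nil => intro _; rfl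
    | cons k ks ih =>
      intro hmem
      have hg : g k = h k := hmem k (List.mem_cons_self ..)
      simp only [List.map_cons, List.filter_cons, List.filterMap_cons, hg]
      by_cases h0 : 0 < h k <;>
        simp [h0, ih (fun x hx => hmem x (List.mem_cons_of_mem _ hx))]
  exact this pvKeys hk

-- ===== VERDICT (by name: the statement is the Claim_ definition above) =====
theorem analyze_file_changes_spec : Claim_equal_analyze_file_changes := by
  intro files _
  unfold Spec_analyze_file_changes analyze_file_changes analyze_file_changes_alt
  simp only [pv_step_eq]
  rw [show PySem.Dict.ofList [("frontend", (0 : Int)), ("backend", 0), ("tests", 0), ("config", 0), ("docs", 0), ("other", 0)] = pvInit from rfl]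
  set names := files.map (fun f => PySem.Str.lower ((PySem.Dict.ofList f).getD "filename" "")) with hnames
  have hfold : files.foldl (fun d f =>
        d.modify (pvLabel (PySem.Str.lower ((PySem.Dict.ofList f).getD "filename" ""))) 0 (· + 1)) pvInit
      = (names.map pvLabel).foldl (fun d x => d.modify x 0 (· + 1)) pvInit := by
    rw [hnames, List.map_map, List.foldl_map]
    rfl
  rw [hfold]
  rw [pv_items_final (names.map pvLabel)
    (by intro x hx; obtain ⟨n, _, rfl⟩ := List.mem_map.mp hx; exact pv_label_mem n)]
  simp only [pvRules, List.foldl]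
  apply pv_assemble
  intro k hk
  fin_cases hk <;>
    simp only [PySem.Dict.getD_insert, String.reduceEq, reduceIte, PySem.Dict.getD_empty] <;>
    [rw [← pv_count2]; rw [← pv_count3]; rw [← pv_count1]; rw [← pv_count4]; rw [← pv_count5]; rw [← pv_count6]]
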